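-- pv_equiv track=rewrite | github.com/Ankit-ICY/My-Python-DSA-Problems | OCTOBER/kthSymGrammer.py | solve
-- ===== SOURCE A (Python) =====
-- def solve(n,k,s):
--     if n==1:
--         return s
--
--     string =""
--     for i in range(len(s)):
--         if s[i] == "0":
--             string+='01'
--
--         else:
--             string+="10"
--
--     return solve(n-1,k,string)
-- ===== SOURCE B (Python) =====
-- def solve(n, k, s):
--     while n != 1:
--         s = ''.join('01' if c == '0' else '10' for c in s)
--         n -= 1
--     return s
-- ===== Notes on version B (the rewrite author's own statement) =====
-- stated objective: simpler
-- what changed: Replaces the recursion with an iterative while-loop and replaces the index-driven accumulator loop by a join over a per-character map comprehension.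
import Mathlib
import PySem

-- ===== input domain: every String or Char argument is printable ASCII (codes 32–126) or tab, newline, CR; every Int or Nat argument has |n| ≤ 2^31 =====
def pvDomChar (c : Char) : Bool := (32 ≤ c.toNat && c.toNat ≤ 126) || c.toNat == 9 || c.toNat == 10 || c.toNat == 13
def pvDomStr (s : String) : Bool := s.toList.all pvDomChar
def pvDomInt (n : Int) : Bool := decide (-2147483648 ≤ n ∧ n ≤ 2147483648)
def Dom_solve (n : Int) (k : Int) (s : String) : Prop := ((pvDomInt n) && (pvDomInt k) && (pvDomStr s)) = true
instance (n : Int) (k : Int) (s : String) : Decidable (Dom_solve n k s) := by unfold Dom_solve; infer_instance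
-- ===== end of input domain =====

-- B replaces A's recursion by an iterative while-loop and A's index-accumulator loop by a join of a per-character map (same cost).

-- ===== PORT A =====
-- A's inner loop: for i in range(len(s)): string += '01' if s[i]=='0' else '10'
-- (the index loop visits exactly the characters of s in order, so it is a fold over s.toList)
def solveExpandA (s : String) : String :=
  s.toList.foldl (fun string c => string ++ (if c = '0' then "01" else "10")) ""

-- For n < 1 the Python recursion never terminates (RecursionError); those inputs are
-- outside Pre_solve below, and the port returns s there only to be total.
def solve (n : Int) (k : Int) (s : String) : String :=
  if n = 1 then s
  else if n < 1 then s
  else solve (n - 1) k (solveExpandA s)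
termination_by (n - 1).toNat
decreasing_by omega

-- ===== PORT B =====
-- B: while n != 1: s = ''.join('01' if c == '0' else '10' for c in s); n -= 1
def solveAltLoop : Nat → String → String
  | 0, s => s
  | m + 1, s => solveAltLoop m (String.join (s.toList.map (fun c => if c = '0' then "01" else "10")))

-- The while-loop runs n-1 times when n ≥ 1 (and never terminates in Python when n < 1,
-- which is outside Pre_solve).
def solve_alt (n : Int) (k : Int) (s : String) : String :=
  solveAltLoop (n - 1).toNat s

-- ===== PRECONDITION & SPEC =====
-- Pre_ excludes n < 1, on which the Python A recurses forever (RecursionError) and B loops forever.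
def Pre_solve (n : Int) (k : Int) (s : String) : Prop := 1 ≤ n
instance (n : Int) (k : Int) (s : String) : Decidable (Pre_solve n k s) := by unfold Pre_solve; infer_instance
def pvWitness_solve : Int × Int × String := (3, 1, "01")

def Spec_solve (n : Int) (k : Int) (s : String) (out : String) : Prop := out = solve_alt n k s
instance (n : Int) (k : Int) (s : String) (out : String) : Decidable (Spec_solve n k s out) := by unfold Spec_solve; infer_instance

-- ===== CLAIM (what is proved, stated in full; the proofs are below) =====
def Claim_equal_solve : Prop := ∀ (n : Int) (k : Int) (s : String), Dom_solve n k s → Pre_solve n k s → Spec_solve n k s (solve n k s)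

-- ===== LEMMAS AND PROOFS =====

theorem solve_join_aux (L : List String) (a : String) :
    L.foldl (fun r s => r ++ s) a = a ++ L.foldl (fun r s => r ++ s) "" := by
  induction L generalizing a with
  | nil => simp
  | cons x t ih =>
      simp only [List.foldl_cons]
      rw [ih (a ++ x), ih ("" ++ x)]
      simp [String.append_assoc]

theorem solve_foldl_append (f : Char → String) (l : List Char) (a : String) :
    l.foldl (fun acc c => acc ++ f c) a = a ++ String.join (l.map f) := by
  induction l generalizing a with
  | nil => simp [String.join]
  | cons c t ih =>
      simp only [List.foldl_cons, List.map_cons, String.join]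
      rw [ih, solve_join_aux (List.map f t) ("" ++ f c)]
      simp [String.join, String.append_assoc]

theorem solve_expand_eq (s : String) :
    solveExpandA s = String.join (s.toList.map (fun c => if c = '0' then "01" else "10")) := by
  unfold solveExpandA
  rw [solve_foldl_append]
  simp

theorem solve_eq_loop (m : Nat) : ∀ (n : Int) (k : Int) (s : String), n = (m : Int) + 1 →
    solve n k s = solveAltLoop m s := by
  induction m with
  | zero => intro n k s hn; subst hn; simp [solve, solveAltLoop]
  | succ m ih =>
      intro n k s hn
      rw [solve]
      have h1 : ¬ n = 1 := by omega
      have h2 : ¬ n < 1 := by omega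
      simp only [h1, h2, if_false]
      rw [ih (n - 1) k _ (by omega)]
      simp [solveAltLoop, solve_expand_eq]

theorem solve_spec : Claim_equal_solve := by
  intro n k s _ hpre
  unfold Spec_solve solve_alt
  have hp : 1 ≤ n := hpre
  have h : n = ((n - 1).toNat : Int) + 1 := by omega
  rw [solve_eq_loop (n - 1).toNat n k s h]
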